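-- pv_equiv track=rewrite | github.com/kerimsalt/DS_Practice | practice.py | max_consecutive_odd_numbers
-- ===== SOURCE A (Python) =====
-- def max_consecutive_odd_numbers(nums: list):
--     max_len = 0
--     curr = 0
--     for num in nums:
--         if num % 2 == 1:
--             curr += 1
--         else:
--             curr = 0
--         max_len = max(max_len, curr)
--     return max_len
-- ===== SOURCE B (Python) =====
-- from itertools import groupby
--
-- def max_consecutive_odd_numbers(nums: list):
--     return max((sum(1 for _ in g) for k, g in groupby(nums, key=lambda x: x % 2 == 1) if k),
--                default=0)
-- ===== Notes on version B (the rewrite author's own statement) =====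
-- stated objective: idiomatic
-- what changed: Replaces the running-counter/running-max loop by itertools.groupby: partition the list into maximal runs of equal oddness and take the max length over the odd runs (default 0).
import Mathlib
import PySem

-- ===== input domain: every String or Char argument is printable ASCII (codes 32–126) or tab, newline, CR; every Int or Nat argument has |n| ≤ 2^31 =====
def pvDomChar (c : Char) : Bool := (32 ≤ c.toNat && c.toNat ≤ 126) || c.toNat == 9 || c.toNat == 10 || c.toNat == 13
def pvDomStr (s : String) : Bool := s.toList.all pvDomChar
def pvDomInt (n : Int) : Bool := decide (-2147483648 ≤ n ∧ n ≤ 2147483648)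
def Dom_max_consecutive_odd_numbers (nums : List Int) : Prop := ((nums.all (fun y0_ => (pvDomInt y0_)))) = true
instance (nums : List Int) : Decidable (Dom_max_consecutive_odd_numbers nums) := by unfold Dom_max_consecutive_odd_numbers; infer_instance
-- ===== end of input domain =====

-- B (itertools.groupby over maximal oddness runs) ported structurally; same O(n) cost, idiomatic decomposition.
-- ===== PORT A =====
def max_consecutive_odd_numbers (nums : List Int) : Int :=
  (nums.foldl (fun (st : Int × Int) num =>
      let curr := if num % 2 == 1 then st.2 + 1 else 0
      (max st.1 curr, curr)) (0, 0)).1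

-- ===== PORT B =====
-- groupby(nums, key=odd?) ported as: peel one maximal run of equal oddness (takeWhile /
-- dropWhile on the key), count it if the key is True, recurse on the remainder; max with default 0.
def pvOddKey (x : Int) : Bool := x % 2 == 1

def pvAltGo : List Int → Int
  | [] => 0
  | x :: xs =>
    let run := xs.takeWhile (fun y => pvOddKey y == pvOddKey x)
    let rest := xs.dropWhile (fun y => pvOddKey y == pvOddKey x)
    max (if pvOddKey x then (run.length : Int) + 1 else 0) (pvAltGo rest)
termination_by l => l.length
decreasing_by
  simp only [List.length_cons]
  exact Nat.lt_succ_of_le (List.length_dropWhile_le _ _)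

def max_consecutive_odd_numbers_alt (nums : List Int) : Int := pvAltGo nums

-- ===== PRECONDITION & SPEC =====
def Spec_max_consecutive_odd_numbers (nums : List Int) (out : Int) : Prop := out = max_consecutive_odd_numbers_alt nums
instance (nums : List Int) (out : Int) : Decidable (Spec_max_consecutive_odd_numbers nums out) := by unfold Spec_max_consecutive_odd_numbers; infer_instance

-- ===== CLAIM (what is proved, stated in full; the proofs are below) =====
def Claim_equal_max_consecutive_odd_numbers : Prop := ∀ (nums : List Int), Dom_max_consecutive_odd_numbers nums → Spec_max_consecutive_odd_numbers nums (max_consecutive_odd_numbers nums)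

-- ===== LEMMAS AND PROOFS =====

-- A's loop body
def pvF (st : Int × Int) (num : Int) : Int × Int :=
  let curr := if num % 2 == 1 then st.2 + 1 else 0
  (max st.1 curr, curr)

-- the running max only passes through further maxes, so it can be factored out
theorem pv_max_extract (l : List Int) (m c : Int) (hm : 0 ≤ m) (hc : 0 ≤ c) :
    (l.foldl pvF (m, c)).1 = max m (l.foldl pvF (0, c)).1 := by
  induction l generalizing m c with
  | nil => simpa using (max_eq_left hm).symm
  | cons x xs ih =>
    simp only [List.foldl_cons]
    by_cases hx : x % 2 == 1
    · simp only [pvF, hx, if_pos]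
      rw [ih _ _ (le_max_of_le_right (by omega)) (by omega),
          ih _ _ (le_max_of_le_right (by omega)) (by omega)]
      omega
    · simp only [pvF, hx, if_neg, Bool.false_eq_true, not_false_iff]
      rw [ih _ _ (le_max_of_le_right le_rfl) le_rfl,
          ih _ _ (le_max_of_le_right le_rfl) le_rfl]
      omega

-- over an all-odd run the counter just adds the length
theorem pv_odd_run (l : List Int) (hall : ∀ y ∈ l, pvOddKey y = true) (m c : Int) (hmc : c ≤ m) :
    l.foldl pvF (m, c) = (max m (c + l.length), c + l.length) := by
  induction l generalizing m c with
  | nil => simp; omega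
  | cons x xs ih =>
    have hx : x % 2 == 1 := hall x (List.mem_cons_self ..)
    simp only [List.foldl_cons, pvF, hx, if_pos]
    rw [ih (fun y hy => hall y (List.mem_cons_of_mem _ hy)) _ _ (le_max_right _ _)]
    rw [Prod.ext_iff]
    constructor <;> simp <;> omega

-- over an all-even run the state (0,0) is a fixed point
theorem pv_even_run (l : List Int) (hall : ∀ y ∈ l, pvOddKey y = false) :
    l.foldl pvF (0, 0) = (0, 0) := by
  induction l with
  | nil => rfl
  | cons x xs ih =>
    have hx : pvOddKey x = false := hall x (List.mem_cons_self ..)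
    simp only [List.foldl_cons, pvF, pvOddKey] at *
    rw [hx]
    simpa using ih (fun y hy => hall y (List.mem_cons_of_mem _ hy))

theorem pv_altGo_nonneg (l : List Int) : 0 ≤ pvAltGo l := by
  fun_induction pvAltGo l with
  | case1 => simp
  | case2 x xs run rest ih => exact le_max_of_le_right ih

-- the head of dropWhile fails the predicate
theorem pv_dropWhile_head {p : Int → Bool} {l rs : List Int} {z : Int}
    (h : l.dropWhile p = z :: rs) : p z = false := by
  induction l with
  | nil => simp at h
  | cons a l ih =>
    rw [List.dropWhile_cons] at h
    by_cases hp : p a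
    · rw [if_pos hp] at h; exact ih h
    · rw [if_neg hp] at h
      cases h
      exact Bool.eq_false_iff.mpr hp

-- after an odd run ends (rest empty or even-headed), m absorbs and the tail restarts from (0,0)
theorem pv_rest (rest : List Int) (m c : Int) (hm : 0 ≤ m)
    (hr : rest = [] ∨ ∃ z rs, rest = z :: rs ∧ pvOddKey z = false) :
    (rest.foldl pvF (m, c)).1 = max m (rest.foldl pvF (0, 0)).1 := by
  rcases hr with h | ⟨z, rs, rfl, hz⟩
  · subst h; simpa using (max_eq_left hm).symm
  · have hz' : (z % 2 == 1) = false := hz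
    have h1 : pvF (m, c) z = (m, 0) := by simp [pvF, hz', max_eq_left hm]
    have h2 : pvF (0, 0) z = (0, 0) := by simp [pvF, hz']
    rw [List.foldl_cons, List.foldl_cons, h1, h2]
    exact pv_max_extract rs m 0 hm le_rfl

theorem pv_main (nums : List Int) : (nums.foldl pvF (0, 0)).1 = pvAltGo nums := by
  fun_induction pvAltGo nums with
  | case1 => rfl
  | case2 x xs run rest ih =>
    have hsplit : xs = run ++ rest := (List.takeWhile_append_dropWhile).symm
    rw [hsplit]
    by_cases hx : pvOddKey x
    · have hrest : rest = [] ∨ ∃ z rs, rest = z :: rs ∧ pvOddKey z = false := by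
        cases hcase : (rest : List Int) with
        | nil => exact Or.inl rfl
        | cons z rs =>
          refine Or.inr ⟨z, rs, rfl, ?_⟩
          have hd := pv_dropWhile_head
            (show xs.dropWhile (fun y => pvOddKey y == pvOddKey x) = z :: rs from hcase)
          simpa [hx] using hd
      have hrun : ∀ y ∈ run, pvOddKey y = true := by
        intro y hy
        have := List.mem_takeWhile_imp hy
        simpa [hx] using this
      have hx' : (x % 2 == 1) = true := hx
      simp only [List.foldl_cons, List.foldl_append, pvF, hx', if_pos]
      rw [pv_odd_run run hrun (max 0 (0+1)) (0+1) (le_max_right _ _)]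
      have h1 : max (max (0:Int) (0+1)) (0 + 1 + (run.length : Int)) = (run.length : Int) + 1 := by
        have : (0:Int) ≤ (run.length : Int) := Int.natCast_nonneg _
        omega
      rw [h1, show (0:Int) + 1 + (run.length : Int) = (run.length : Int) + 1 by ring]
      rw [pv_rest rest _ _ (by positivity) hrest, ih, hx, if_pos rfl]
    · have hxf : pvOddKey x = false := Bool.eq_false_iff.mpr hx
      have hrun : ∀ y ∈ run, pvOddKey y = false := by
        intro y hy
        have h := List.mem_takeWhile_imp hy
        rw [hxf] at h
        simpa using h
      have hx' : ¬ ((x % 2 == 1) = true) := hx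
      simp only [List.foldl_cons, List.foldl_append, pvF, hx', if_neg, Bool.false_eq_true,
        not_false_iff]
      have h0 : (max (0:Int) 0, (0:Int)) = ((0:Int), (0:Int)) := by simp
      rw [h0, pv_even_run run hrun, ih, hxf]
      simp [pv_altGo_nonneg rest]

-- ===== VERDICT (by name: the statement is the Claim_ definition above) =====
theorem max_consecutive_odd_numbers_spec : Claim_equal_max_consecutive_odd_numbers := by
  intro nums _
  unfold Spec_max_consecutive_odd_numbers max_consecutive_odd_numbers max_consecutive_odd_numbers_alt
  exact pv_main nums
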